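-- pv_equiv track=rewrite | github.com/ulif/diceware-list | diceware_list/libwordlist.py | get_matching_prefixes
-- ===== SOURCE A (Python) =====
-- def get_matching_prefixes(iterable, is_sorted=False):
--     """Get tuples of terms from `iterable` where one term is prefix of
--     another term.
--
--     The tuples will contain the prefix and exactly one prefixed term::
--
--        >>> list(get_matching_prefixes(["a", "b", "aa"]))
--        [('a', 'aa')]
--
--     For terms that prefix more than one other term, one tuple is
--     returned for each of the prefixed terms::
--
--        >>> list(get_matching_prefixes(["a", "aa", "ab"]))
--        [('a', 'aa'), ('a', 'ab')]
--
--     The `is_sorted` parameter is a hint telling, whether the given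
--     `iterable` is already sorted or not. If it is, we do not resort
--     the iterable and can compute results much faster.
--
--     Results are undefined - and most probably broken -, if `is_sorted`
--     is ``True`` while in fact the `iterable` is unsorted.
--
--     This function is not destructive, which means that iterables
--     passed-in will not be changed.
--
--     """
--     elems = iterable[:]
--     if not is_sorted:
--         elems.sort()
--     while len(elems) > 1:
--         idx = 1
--         while elems[0] and elems[idx].startswith(elems[0]):
--             yield elems[0], elems[idx]
--             idx += 1
--             if idx == len(elems):
--                 break
--         elems.pop(0)
-- ===== SOURCE B (Python) =====
-- def get_matching_prefixes(iterable, is_sorted=False):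
--     """Non-destructive index-based forward scan over the sorted list."""
--     elems = list(iterable) if is_sorted else sorted(iterable)
--     n = len(elems)
--     out = []
--     for i in range(n):
--         p = elems[i]
--         if not p:
--             continue
--         j = i + 1
--         while j < n and elems[j].startswith(p):
--             out.append((p, elems[j]))
--             j += 1
--     return out
-- ===== Notes on version B (the rewrite author's own statement) =====
-- stated objective: alternative
-- what changed: Replaces the destructive while-loop that repeatedly pops the head of a working copy of the list with a non-destructive index-based forward scan (outer for over indices, inner scan from i+1), collecting pairs into a list instead of yielding from a shrinking copy.
import Mathlib
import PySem

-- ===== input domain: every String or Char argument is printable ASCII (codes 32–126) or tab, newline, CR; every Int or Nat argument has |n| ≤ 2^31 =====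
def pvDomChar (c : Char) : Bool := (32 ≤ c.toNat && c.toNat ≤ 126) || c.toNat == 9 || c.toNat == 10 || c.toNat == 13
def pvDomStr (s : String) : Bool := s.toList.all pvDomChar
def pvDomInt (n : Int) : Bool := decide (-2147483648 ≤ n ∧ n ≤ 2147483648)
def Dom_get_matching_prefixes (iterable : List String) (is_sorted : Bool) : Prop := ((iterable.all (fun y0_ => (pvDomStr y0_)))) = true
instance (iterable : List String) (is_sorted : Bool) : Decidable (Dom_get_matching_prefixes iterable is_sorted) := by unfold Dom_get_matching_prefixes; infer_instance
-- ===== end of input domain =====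

-- B replaces A's head-popping while-loop over a shrinking copy by an index-based
-- forward scan over the sorted list; return value only (A is a generator, B returns a list).

-- ===== PORT A =====
-- inner 'while elems[0] and elems[idx].startswith(elems[0]): yield …; idx += 1' over the tail
def pvInnerA (h : String) : List String → List (List String)
  | [] => []
  | x :: xs =>
      if h ≠ "" ∧ PySem.Str.startswith x h then [h, x] :: pvInnerA h xs else []

-- outer 'while len(elems) > 1: …; elems.pop(0)'
def pvLoopA : List String → List (List String)
  | h :: x :: xs => pvInnerA h (x :: xs) ++ pvLoopA (x :: xs)
  | _ => []

def get_matching_prefixes (iterable : List String) (is_sorted : Bool) : List (List String) :=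
  let elems := if !is_sorted then PySem.List.sorted iterable (fun s => s) false else iterable
  pvLoopA elems

-- ===== PORT B =====
-- inner 'while j < n and elems[j].startswith(p): out.append(…); j += 1'
def pvInnerB (elems : List String) (p : String) (j : Nat) : List (List String) :=
  if hj : j < elems.length then
    if PySem.Str.startswith elems[j] p then [p, elems[j]] :: pvInnerB elems p (j + 1) else []
  else []
termination_by elems.length - j

-- outer 'for i in range(n): …'
def get_matching_prefixes_alt (iterable : List String) (is_sorted : Bool) : List (List String) :=
  let elems := if is_sorted then iterable else PySem.List.sorted iterable (fun s => s) false
  (List.range elems.length).flatMap (fun i =>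
    let p := elems.getD i ""
    if p = "" then [] else pvInnerB elems p (i + 1))

-- ===== PRECONDITION & SPEC =====
def Spec_get_matching_prefixes (iterable : List String) (is_sorted : Bool) (out : List (List String)) : Prop := out = get_matching_prefixes_alt iterable is_sorted
instance (iterable : List String) (is_sorted : Bool) (out : List (List String)) : Decidable (Spec_get_matching_prefixes iterable is_sorted out) := by unfold Spec_get_matching_prefixes; infer_instance

-- ===== CLAIM (what is proved, stated in full; the proofs are below) =====
def Claim_equal_get_matching_prefixes : Prop := ∀ (iterable : List String) (is_sorted : Bool), Dom_get_matching_prefixes iterable is_sorted → Spec_get_matching_prefixes iterable is_sorted (get_matching_prefixes iterable is_sorted)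

-- ===== LEMMAS AND PROOFS =====

-- reference scan used only in proofs
def pvScan (p : String) : List String → List (List String)
  | [] => []
  | x :: xs => if PySem.Str.startswith x p then [p, x] :: pvScan p xs else []

theorem pvInnerB_eq_scan (elems : List String) (p : String) (j : Nat) :
    pvInnerB elems p j = pvScan p (elems.drop j) := by
  fun_induction pvInnerB elems p j with
  | case1 j hj hs ih =>
      rw [List.drop_eq_getElem_cons hj, pvScan, if_pos hs, ih]
  | case2 j hj hs =>
      rw [List.drop_eq_getElem_cons hj, pvScan, if_neg hs]
  | case3 j hj =>
      rw [List.drop_eq_nil_of_le (by omega), pvScan]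

theorem pvInnerA_eq_scan (h : String) (l : List String) (hne : h ≠ "") :
    pvInnerA h l = pvScan h l := by
  induction l with
  | nil => rfl
  | cons x xs ih =>
      simp only [pvInnerA, pvScan, hne, ne_eq, not_false_eq_true, true_and, ih]

theorem pvInnerA_empty (l : List String) : pvInnerA "" l = [] := by
  cases l with
  | nil => rfl
  | cons x xs => simp [pvInnerA]

theorem pvLoopA_eq (l : List String) :
    pvLoopA l = (List.range l.length).flatMap (fun i =>
      let p := l.getD i ""
      if p = "" then [] else pvInnerB l p (i + 1)) := by
  induction l with
  | nil => rfl
  | cons h t ih =>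
      rw [List.length_cons, List.range_succ_eq_map, List.flatMap_cons, List.flatMap_map]
      have hbody : ∀ i : Nat,
          (fun i : Nat =>
            let p := (h :: t).getD (i + 1) ""
            if p = "" then [] else pvInnerB (h :: t) p (i + 1 + 1)) i
          = (fun i : Nat =>
            let p := t.getD i ""
            if p = "" then [] else pvInnerB t p (i + 1)) i := by
        intro i
        simp only [List.getD_cons_succ, pvInnerB_eq_scan]
        rfl
      have hhead :
          (let p := (h :: t).getD 0 ""
           if p = "" then [] else pvInnerB (h :: t) p (0 + 1)) = pvInnerA h t := by
        simp only [List.getD_cons_zero, pvInnerB_eq_scan, List.drop_succ_cons, List.drop_zero]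
        by_cases hh : h = ""
        · simp [hh, pvInnerA_empty]
        · simp [hh, pvInnerA_eq_scan h t hh]
      rw [List.flatMap_congr (fun i _ => hbody i), hhead, ← ih]
      cases t with
      | nil => simp [pvLoopA, pvInnerA]
      | cons x xs => rfl

theorem pvMain (elems : List String) :
    pvLoopA elems = (List.range elems.length).flatMap (fun i =>
      let p := elems.getD i ""
      if p = "" then [] else pvInnerB elems p (i + 1)) := pvLoopA_eq elems

-- ===== VERDICT (by name: the statement is the Claim_ definition above) =====
theorem get_matching_prefixes_spec : Claim_equal_get_matching_prefixes := by
  intro iterable is_sorted _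
  unfold Spec_get_matching_prefixes get_matching_prefixes get_matching_prefixes_alt
  cases is_sorted <;> simp only [Bool.not_true, Bool.not_false, if_true] <;>
    exact pvMain _
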